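-- pv_equiv track=rewrite | github.com/quarbby/BotBuster-Universe | BotBuster_UI/botsorter_algo.py | get_periodicity
-- ===== SOURCE A (Python) =====
-- import collections
--
-- def get_periodicity(signal):
--     if len(signal) <= 10:
--         return False, None
--
--     try:
--         df_signal = signal
--
--         diff_between_peaks = [x - df_signal[i - 1] for i, x in enumerate(df_signal)][1:]
--
--         if len(diff_between_peaks) == 1:
--             return True, diff_between_peaks[0]
--
--         b = collections.Counter(diff_between_peaks)
--         most_common_val = b.most_common()[0][1]
--
--         if most_common_val >= (0.5 * len(diff_between_peaks)):
--             return True, most_common_val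
--         else:
--             return False, None
--     except:
--         return False, None
-- ===== SOURCE B (Python) =====
-- def get_periodicity(sig):
--     # (parameter renamed from 'signal' only because the sandbox denies that
--     # stdlib-module name; it is the same positional parameter)
--     if len(sig) <= 10:
--         return False, None
--     diffs = sorted(b - a for a, b in zip(sig, sig[1:]))
--     best = run = 1
--     for prev, cur in zip(diffs, diffs[1:]):
--         run = run + 1 if cur == prev else 1
--         if run > best:
--             best = run
--     # 2*best >= len(diffs) is exactly best >= 0.5*len(diffs) for integers
--     if 2 * best >= len(diffs):
--         return True, best
--     return False, None
-- ===== Notes on version B (the rewrite author's own statement) =====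
-- stated objective: alternative
-- what changed: Computes the diffs directly via zip and finds the top frequency by sorting the diffs and scanning once for the longest run of equal consecutive values, instead of building a collections.Counter and sorting its items by count via most_common; the unreachable len==1 branch and the try/except disappear.
import Mathlib
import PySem

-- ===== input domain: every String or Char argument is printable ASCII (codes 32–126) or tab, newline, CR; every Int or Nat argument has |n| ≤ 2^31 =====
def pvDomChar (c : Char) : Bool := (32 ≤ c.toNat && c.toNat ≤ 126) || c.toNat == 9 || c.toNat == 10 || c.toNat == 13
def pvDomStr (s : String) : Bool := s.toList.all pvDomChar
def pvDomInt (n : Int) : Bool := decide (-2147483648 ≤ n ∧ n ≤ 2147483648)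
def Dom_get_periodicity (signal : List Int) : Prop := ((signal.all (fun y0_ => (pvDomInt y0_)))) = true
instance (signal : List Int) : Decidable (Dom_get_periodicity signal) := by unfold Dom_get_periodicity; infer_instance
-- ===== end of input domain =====

-- B finds the top diff frequency by sorting the diffs and scanning for the longest run of
-- equal consecutive values, instead of Counter + most_common (hash counting, then a sort
-- by count); an alternative algorithm of similar cost, with A's dead branches removed.

-- ===== PORT A =====
def get_periodicity (signal : List Int) : Bool × Option Int :=
  if signal.length ≤ 10 then (false, none)
  else
    let df_signal := signal
    -- signal[i-1]: pyGet? is exact (for i = 0 it reads the last element); the list is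
    -- nonempty in this branch so pyGet? is always `some` and the `.getD 0` default is dead.
    let diff_between_peaks :=
      PySem.List.slice ((PySem.List.enumerate df_signal).map
        (fun p => p.2 - (PySem.List.pyGet? df_signal (p.1 - 1)).getD 0)) (some 1) none
    if diff_between_peaks.length = 1 then
      (true, PySem.List.pyGet? diff_between_peaks 0)
    else
      let b := PySem.Dict.counter diff_between_peaks
      -- Counter.most_common(): items sorted by count, descending, stable
      let mc := PySem.List.sorted b.items (fun kv => kv.2) true
      match PySem.List.pyGet? mc 0 with
      | none => (false, none)  -- [0] on an empty list: IndexError, caught by the bare except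
      | some kv =>
        -- most_common_val >= 0.5*len is exactly 2*most_common_val >= len for integers this size
        if 2 * kv.2 ≥ (diff_between_peaks.length : Int) then (true, some kv.2)
        else (false, none)

-- ===== PORT B =====
def get_periodicity_alt (signal : List Int) : Bool × Option Int :=
  if signal.length ≤ 10 then (false, none)
  else
    let diffs := PySem.List.sorted ((signal.zip (signal.drop 1)).map (fun p => p.2 - p.1))
      (fun x => x) false
    -- 'for prev, cur in zip(diffs, diffs[1:])' carrying (best, run), both starting at 1
    let st := (diffs.zip (diffs.drop 1)).foldl
      (fun (st : Int × Int) pc =>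
        let run := if pc.2 = pc.1 then st.2 + 1 else 1
        (if run > st.1 then run else st.1, run)) (1, 1)
    -- 2*best >= len(diffs) is exactly best >= 0.5*len(diffs) for integers
    if 2 * st.1 ≥ (diffs.length : Int) then (true, some st.1) else (false, none)

-- ===== PRECONDITION & SPEC =====
def Spec_get_periodicity (signal : List Int) (out : Bool × Option Int) : Prop := out = get_periodicity_alt signal
instance (signal : List Int) (out : Bool × Option Int) : Decidable (Spec_get_periodicity signal out) := by unfold Spec_get_periodicity; infer_instance

-- ===== CLAIM (what is proved, stated in full; the proofs are below) =====
def Claim_equal_get_periodicity : Prop := ∀ (signal : List Int), Dom_get_periodicity signal → Spec_get_periodicity signal (get_periodicity signal)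

-- ===== LEMMAS AND PROOFS =====

-- A's and B's (unsorted) difference lists coincide: the enumerate/pyGet? list with its
-- wrap-around first element sliced off equals the zip-of-consecutive-pairs list.
lemma diff_lists_eq (signal : List Int) :
    PySem.List.slice ((PySem.List.enumerate signal).map
        (fun p => p.2 - (PySem.List.pyGet? signal (p.1 - 1)).getD 0)) (some 1) none
      = (signal.zip (signal.drop 1)).map (fun p => p.2 - p.1) := by
  rw [PySem.List.slice_from_one]
  apply List.ext_getElem
  · simp [PySem.List.length_enumerate]
  · intro k h1 h2
    have hk1 : k + 1 < signal.length := by simp at h2; omega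
    simp only [List.getElem_tail, List.getElem_map, List.getElem_zip,
      PySem.List.getElem_enumerate, List.getElem_drop]
    have hc : ((0:Int) + ↑(k + 1) - 1) = (k : Int) := by push_cast; ring
    rw [hc, PySem.List.pyGet?_natCast]
    simp [List.getElem?_eq_getElem (show k < signal.length by omega), Nat.add_comm]

-- A side: the head of most_common is an achieved count and dominates every count.
lemma head_count_spec (d : List Int)
    (m : Int × Int) (t : List (Int × Int))
    (hmc : PySem.List.sorted (PySem.Dict.counter d).items (fun kv => kv.2) true = m :: t) :
    (∃ k ∈ d, m.2 = (d.count k : Int)) ∧ (∀ x ∈ d, (d.count x : Int) ≤ m.2) := by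
  have hmem_m : m ∈ (PySem.Dict.counter d).items := by
    rw [← PySem.List.mem_sorted (key := fun kv => kv.2) (rev := true), hmc]
    exact List.mem_cons_self
  rw [PySem.Dict.items_counter] at hmem_m
  obtain ⟨k0, hk0, hm⟩ := List.mem_map.mp hmem_m
  have hmax_items := PySem.List.key_head_sorted_rev_ge _ _ hmc
  refine ⟨⟨k0, (PySem.Set.mem_ofList d k0).mp hk0, by rw [← hm]⟩, fun x hx => ?_⟩
  have hxi : (x, (d.count x : Int)) ∈ (PySem.Set.ofList d).map (fun k => (k, (d.count k : Int))) :=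
    List.mem_map.mpr ⟨x, (PySem.Set.mem_ofList d x).mpr hx, rfl⟩
  exact hmax_items _ (by rw [PySem.Dict.items_counter]; exact hxi)

-- B side, proof-only recursion mirroring the fold over consecutive pairs
def runScan : Int → Int × Int → List Int → Int × Int
  | _, st, [] => st
  | prev, (best, run), c :: l =>
      let run' := if c = prev then run + 1 else 1
      runScan c (if run' > best then run' else best, run') l

lemma foldl_zip_eq_runScan (a : Int) (l : List Int) (st : Int × Int) :
    ((a :: l).zip l).foldl
      (fun (st : Int × Int) pc =>
        ((if (if pc.2 = pc.1 then st.2 + 1 else 1) > st.1 then (if pc.2 = pc.1 then st.2 + 1 else 1)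
          else st.1), if pc.2 = pc.1 then st.2 + 1 else 1)) st = runScan a st l := by
  induction l generalizing a st with
  | nil => rfl
  | cons c l ih =>
      obtain ⟨best, run⟩ := st
      simp only [List.zip_cons_cons, List.foldl_cons, ih]
      rfl

-- the "maximum over the rest" value runScan accumulates
def restMax : Int → Int → List Int → Int
  | _, run, [] => run
  | prev, run, c :: l => if c = prev then restMax c (run + 1) l else max (restMax c 1 l) run

lemma le_restMax (prev run : Int) (l : List Int) : run ≤ restMax prev run l := by
  induction l generalizing prev run with
  | nil => simp [restMax]
  | cons c l ih =>
      simp only [restMax]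
      split_ifs with h
      · exact le_trans (by omega) (ih c (run + 1))
      · omega

lemma runScan_fst (l : List Int) (prev best run : Int) (hrb : run ≤ best) :
    (runScan prev (best, run) l).1 = max best (restMax prev run l) := by
  induction l generalizing prev best run with
  | nil => simp [runScan, restMax]; omega
  | cons c l ih =>
      simp only [runScan, restMax]
      rw [ih c (if (if c = prev then run + 1 else 1) > best then (if c = prev then run + 1 else 1)
            else best) (if c = prev then run + 1 else 1) (by split_ifs <;> omega)]
      have h1 := le_restMax c (run + 1) l
      have h2 := le_restMax c 1 l
      split_ifs <;> omega

lemma restMax_spec (l : List Int) (prev run : Int)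
    (hs : l.Pairwise (· ≤ ·)) (hp : ∀ x ∈ l, prev ≤ x) :
    ((∃ x ∈ l, x ≠ prev ∧ restMax prev run l = (l.count x : Int)) ∨
        restMax prev run l = run + (l.count prev : Int)) ∧
      (∀ x ∈ l, x ≠ prev → (l.count x : Int) ≤ restMax prev run l) ∧
      run + (l.count prev : Int) ≤ restMax prev run l := by
  induction l generalizing prev run with
  | nil => simp [restMax]
  | cons c l ih =>
      rw [List.pairwise_cons] at hs
      obtain ⟨hcl, hsl⟩ := hs
      by_cases hcp : c = prev
      · subst hcp
        rw [show restMax c run (c :: l) = restMax c (run + 1) l from by simp [restMax]]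
        obtain ⟨hach, hdom, hself⟩ := ih c (run + 1) hsl hcl
        refine ⟨?_, ?_, ?_⟩
        · rcases hach with ⟨x, hx, hxc, he⟩ | he
          · exact Or.inl ⟨x, List.mem_cons_of_mem _ hx, hxc,
              by rw [he, List.count_cons_of_ne (Ne.symm hxc)]⟩
          · refine Or.inr ?_
            rw [he, List.count_cons_self]
            push_cast; ring
        · intro x hx hxc
          have hxl : x ∈ l := by
            rcases List.mem_cons.mp hx with h | h
            · exact absurd h hxc
            · exact h
          rw [List.count_cons_of_ne (Ne.symm hxc)]
          exact hdom x hxl hxc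
        · rw [List.count_cons_self]
          push_cast
          omega
      · -- prev < c ≤ every element of c :: l, so prev does not occur in c :: l
        have hpc : prev < c := lt_of_le_of_ne (hp c List.mem_cons_self) (fun h => hcp h.symm)
        have hplt : ∀ x ∈ c :: l, prev < x := by
          intro x hx
          rcases List.mem_cons.mp hx with h | h
          · omega
          · exact lt_of_lt_of_le hpc (hcl x h)
        have hcount0 : (c :: l).count prev = 0 := by
          rw [List.count_eq_zero]
          intro hmem
          exact absurd rfl (ne_of_gt (hplt prev hmem))
        rw [show restMax prev run (c :: l) = max (restMax c 1 l) run from by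
          simp [restMax, hcp]]
        obtain ⟨hach, hdom, hself⟩ := ih c 1 hsl hcl
        refine ⟨?_, ?_, ?_⟩
        · rcases le_total run (restMax c 1 l) with hle | hlt
          · rw [max_eq_left hle]
            rcases hach with ⟨x, hx, hxc, he⟩ | he
            · have hxprev : x ≠ prev := ne_of_gt (hplt x (List.mem_cons_of_mem _ hx))
              exact Or.inl ⟨x, List.mem_cons_of_mem _ hx, hxprev,
                by rw [he, List.count_cons_of_ne (Ne.symm hxc)]⟩
            · exact Or.inl ⟨c, List.mem_cons_self, fun h => hcp h,
                by rw [he, List.count_cons_self]; push_cast; ring⟩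
          · rw [max_eq_right hlt]
            refine Or.inr ?_
            rw [hcount0]
            push_cast; ring
        · intro x hx hxprev
          by_cases hxc : x = c
          · subst hxc
            rw [List.count_cons_self]
            have := le_max_left (restMax x 1 l) run
            push_cast
            omega
          · have hxl : x ∈ l := by
              rcases List.mem_cons.mp hx with h | h
              · exact absurd h hxc
              · exact h
            rw [List.count_cons_of_ne (Ne.symm hxc)]
            have := hdom x hxl hxc
            have := le_max_left (restMax c 1 l) run
            omega
        · rw [hcount0]
          push_cast
          have := le_max_right (restMax c 1 l) run
          omega

-- B side: on a sorted nonempty list, the longest-run scan's best is an achieved count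
-- and dominates every count.
lemma runScan_count_spec (a : Int) (l : List Int)
    (hs : (a :: l).Pairwise (· ≤ ·)) :
    (∃ x ∈ a :: l, (runScan a (1, 1) l).1 = ((a :: l).count x : Int)) ∧
      (∀ x ∈ a :: l, ((a :: l).count x : Int) ≤ (runScan a (1, 1) l).1) := by
  rw [List.pairwise_cons] at hs
  obtain ⟨hal, hsl⟩ := hs
  rw [runScan_fst l a 1 1 le_rfl, max_eq_right (le_restMax a 1 l)]
  obtain ⟨hach, hdom, hself⟩ := restMax_spec l a 1 hsl hal
  constructor
  · rcases hach with ⟨x, hx, hxa, he⟩ | he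
    · exact ⟨x, List.mem_cons_of_mem _ hx, by rw [he, List.count_cons_of_ne (Ne.symm hxa)]⟩
    · exact ⟨a, List.mem_cons_self, by rw [he, List.count_cons_self]; push_cast; ring⟩
  · intro x hx
    by_cases hxa : x = a
    · subst hxa
      rw [List.count_cons_self]
      push_cast
      omega
    · have hxl : x ∈ l := by
        rcases List.mem_cons.mp hx with h | h
        · exact absurd h hxa
        · exact h
      rw [List.count_cons_of_ne (Ne.symm hxa)]
      exact hdom x hxl hxa

-- ===== VERDICT (by name: the statement is the Claim_ definition above) =====
theorem get_periodicity_spec : Claim_equal_get_periodicity := by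
  intro signal _
  unfold Spec_get_periodicity
  by_cases h : signal.length ≤ 10
  · simp [get_periodicity, get_periodicity_alt, h]
  · simp only [get_periodicity, get_periodicity_alt, if_neg h]
    rw [diff_lists_eq signal]
    set d := (signal.zip (signal.drop 1)).map (fun p => p.2 - p.1) with hdd
    have hlen : d.length = signal.length - 1 := by simp [hdd]
    have hne1 : ¬ (d.length = 1) := by omega
    rw [if_neg hne1]
    -- the sorted copy of d
    set ds := PySem.List.sorted d (fun x => x) false with hds
    have hperm : ds.Perm d := PySem.List.sorted_perm d (fun x => x) false
    have hdsne : ds ≠ [] := by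
      intro hc
      have := hperm.length_eq
      rw [hc] at this
      simp at this
      omega
    obtain ⟨a, l, hal⟩ := List.exists_cons_of_ne_nil hdsne
    have hsorted : (a :: l).Pairwise (· ≤ ·) := by
      rw [← hal, hds]
      exact PySem.List.sorted_pairwise d (fun x => x)
    -- A side head
    have hdne : d ≠ [] := by
      intro hc
      rw [hc] at hlen
      simp at hlen
      omega
    have hitems : (PySem.Dict.counter d).items ≠ [] := by
      rw [PySem.Dict.items_counter]
      intro hc
      obtain ⟨x, hx⟩ := List.exists_mem_of_ne_nil d hdne
      have hx' : (x, (d.count x : Int)) ∈ (PySem.Set.ofList d).map (fun k => (k, (d.count k : Int))) :=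
        List.mem_map.mpr ⟨x, (PySem.Set.mem_ofList d x).mpr hx, rfl⟩
      rw [hc] at hx'
      exact absurd hx' (List.not_mem_nil)
    have hmcne : PySem.List.sorted (PySem.Dict.counter d).items (fun kv => kv.2) true ≠ [] := by
      rw [Ne, PySem.List.sorted_eq_nil_iff]
      exact hitems
    obtain ⟨m, t, hmc⟩ := List.exists_cons_of_ne_nil hmcne
    obtain ⟨⟨k0, hk0, hk0e⟩, hAdom⟩ := head_count_spec d m t hmc
    -- B side best
    obtain ⟨⟨x0, hx0, hx0e⟩, hBdom⟩ := runScan_count_spec a l hsorted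
    -- counts and membership transported along the permutation ds ~ d
    have hcnt : ∀ y : Int, List.count y (a :: l) = List.count y d := by
      intro y
      rw [← hal]
      exact hperm.count_eq y
    have hmem : ∀ y : Int, y ∈ (a :: l) ↔ y ∈ d := by
      intro y
      rw [← hal]
      exact hperm.mem_iff
    -- the sandwich: B's best equals A's head count
    have hbest : (runScan a (1, 1) l).1 = m.2 := by
      have h1 : (runScan a (1, 1) l).1 ≤ m.2 := by
        rw [hx0e, hcnt x0]
        exact hAdom x0 ((hmem x0).mp hx0)
      have h2 : m.2 ≤ (runScan a (1, 1) l).1 := by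
        rw [hk0e, ← hcnt k0]
        exact hBdom k0 ((hmem k0).mpr hk0)
      omega
    have hlds : ((a :: l).length : Int) = (d.length : Int) := by
      have := hperm.length_eq
      rw [hal] at this
      exact_mod_cast this
    rw [hmc, PySem.List.pyGet?_zero_cons, hal]
    simp only [List.drop_one, List.tail_cons]
    rw [foldl_zip_eq_runScan, hbest, hlds]
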